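-- pv_equiv track=rewrite | github.com/YUHSIN6/furiganaPrint | cogs/represent.py | week2date
-- ===== SOURCE A (Python) =====
-- daysOfMonth = [0, 31, 29, 31, 30, 31, 30, 31, 31, 30, 31, 30, 31]
--
-- def week2date(week):
--     """
--     Transferring week to date (date for sectionA and sectionC),
--     it should be smaller than 52.
--     """
--     assert(week <= 52)
--     sectionA, sectionB, sectionC = [1, 2], [1, 5], [1, 7]
--     for i in range(week-1):
--         sectionA[1] += 7
--         if sectionA[1] > daysOfMonth[sectionA[0]]:
--             sectionA = [sectionA[0] + 1, sectionA[1] - daysOfMonth[sectionA[0]]]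
--         sectionB[1] += 7
--         if sectionB[1] > daysOfMonth[sectionB[0]]:
--             sectionB = [sectionB[0] + 1, sectionB[1] - daysOfMonth[sectionB[0]]]
--         sectionC[1] += 7
--         if sectionC[1] > daysOfMonth[sectionC[0]]:
--             sectionC = [sectionC[0] + 1, sectionC[1] - daysOfMonth[sectionC[0]]]
--     return f"{sectionA[0]:02d}/{sectionA[1]:02d}", f"{sectionB[0]:02d}/{sectionB[1]:02d}", f"{sectionC[0]:02d}/{sectionC[1]:02d}"
-- ===== SOURCE B (Python) =====
-- daysOfMonth = [0, 31, 29, 31, 30, 31, 30, 31, 31, 30, 31, 30, 31]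
--
-- def week2date(week):
--     assert(week <= 52)
--     out = []
--     for start in (2, 5, 7):
--         doy = start + 7 * max(0, week - 1)
--         m = 1
--         while doy > daysOfMonth[m]:
--             doy -= daysOfMonth[m]
--             m += 1
--         out.append(f"{m:02d}/{doy:02d}")
--     return tuple(out)
-- ===== Notes on version B (the rewrite author's own statement) =====
-- stated objective: simpler
-- what changed: B computes each section's day-of-year in closed form (start + 7*max(0, week-1)) and converts it with a single walk over the month table, instead of A's week-by-week simulation of three running (month, day) pairs.
import Mathlib
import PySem

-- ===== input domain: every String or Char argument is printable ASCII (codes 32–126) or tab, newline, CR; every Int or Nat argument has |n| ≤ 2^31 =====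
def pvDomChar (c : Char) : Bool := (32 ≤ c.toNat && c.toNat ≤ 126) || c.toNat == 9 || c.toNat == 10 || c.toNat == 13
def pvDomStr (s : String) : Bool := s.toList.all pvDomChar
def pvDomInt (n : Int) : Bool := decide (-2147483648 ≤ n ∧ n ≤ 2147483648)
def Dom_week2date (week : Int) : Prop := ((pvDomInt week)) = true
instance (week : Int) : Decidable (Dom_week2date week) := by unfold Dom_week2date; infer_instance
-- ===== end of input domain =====

-- B replaces A's 52-step week-by-week simulation of three running (month, day) pairs by a direct
-- day-of-year computation per section followed by a single walk over the month table (simpler).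

-- ===== PORT A =====
def daysOfMonth : List Int := [0, 31, 29, 31, 30, 31, 30, 31, 31, 30, 31, 30, 31]

-- daysOfMonth[m]; the index is in range on every iteration reached under Pre_ (week ≤ 52)
def domAt (m : Int) : Int := (PySem.List.pyGet? daysOfMonth m).getD 0

-- f"{x:02d}" for the nonnegative values produced here
def fmt02 (n : Int) : String := PySem.Str.zfill (PySem.Int.toStr n) 2

-- one loop-body step for a single section
def stepA (s : Int × Int) : Int × Int :=
  let s1 := (s.1, s.2 + 7)
  if s1.2 > domAt s1.1 then (s1.1 + 1, s1.2 - domAt s1.1) else s1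

def week2date (week : Int) : String × String × String :=
  let init : (Int × Int) × (Int × Int) × (Int × Int) := ((1, 2), (1, 5), (1, 7))
  let r := (PySem.List.pyRange 0 (week - 1) 1).foldl
    (fun st _ => (stepA st.1, stepA st.2.1, stepA st.2.2)) init
  (fmt02 r.1.1 ++ "/" ++ fmt02 r.1.2,
   fmt02 r.2.1.1 ++ "/" ++ fmt02 r.2.1.2,
   fmt02 r.2.2.1 ++ "/" ++ fmt02 r.2.2.2)

-- ===== PORT B =====
-- the while loop of B: walk the month table (from month m) subtracting while doy exceeds the month
def walkMonths : List Int → Int → Int → Int × Int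
  | [], m, doy => (m, doy)
  | d :: rest, m, doy => if doy > d then walkMonths rest (m + 1) (doy - d) else (m, doy)

def sectionDate (week start : Int) : String :=
  let doy := start + 7 * max 0 (week - 1)
  let (m, d) := walkMonths (daysOfMonth.drop 1) 1 doy
  fmt02 m ++ "/" ++ fmt02 d

def week2date_alt (week : Int) : String × String × String :=
  (sectionDate week 2, sectionDate week 5, sectionDate week 7)

-- ===== PRECONDITION & SPEC =====
-- A's `assert(week <= 52)` raises AssertionError for week > 52; exactly those inputs are excluded.
def Pre_week2date (week : Int) : Prop := week ≤ 52
instance (week : Int) : Decidable (Pre_week2date week) := by unfold Pre_week2date; infer_instance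
def pvWitness_week2date : Int := 30

def Spec_week2date (week : Int) (out : String × String × String) : Prop := out = week2date_alt week
instance (week : Int) (out : String × String × String) : Decidable (Spec_week2date week out) := by unfold Spec_week2date; infer_instance

-- ===== CLAIM (what is proved, stated in full; the proofs are below) =====
def Claim_equal_week2date : Prop := ∀ (week : Int), Dom_week2date week → Pre_week2date week → Spec_week2date week (week2date week)

-- ===== LEMMAS AND PROOFS =====

-- for week ≤ 1 both sides are the constant base result
lemma week2date_base (week : Int) (h : week ≤ 1) :
    week2date week = ("01/02", "01/05", "01/07") := by
  have hr : PySem.List.pyRange 0 (week - 1) 1 = [] := by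
    rw [PySem.List.pyRange_one]
    simp
    omega
  simp only [week2date, hr, List.foldl_nil]
  decide

lemma week2date_alt_base (week : Int) (h : week ≤ 1) :
    week2date_alt week = ("01/02", "01/05", "01/07") := by
  have hm : max 0 (week - 1) = 0 := by omega
  simp only [week2date_alt, sectionDate, hm]
  decide

-- ===== VERDICT (by name: the statement is the Claim_ definition above) =====
theorem week2date_spec : Claim_equal_week2date := by
  intro week _ hpre
  unfold Spec_week2date
  by_cases h1 : week ≤ 1
  · rw [week2date_base week h1, week2date_alt_base week h1]
  · unfold Pre_week2date at hpre
    interval_cases week <;> decide
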